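-- pv_equiv track=rewrite | github.com/luizafonso/pythonusptemp | Listas de Exercícios/Semana07_ExerciciosAdicionais01_Exercicio02_3aTentativa.py | soma_hipotenusas
-- ===== SOURCE A (Python) =====
-- def soma_hipotenusas(n):
-- 	soma = 0
-- 	hipotenusas = []
-- 	for a in range(5, n+1):
-- 		for b in range(a-1, 0, -1):
-- 			for c in range(a-1, 0, -1):
-- 				if((c ** 2) + (b ** 2) == (a ** 2)):
-- 					if(not(a in hipotenusas)):
-- 						hipotenusas.append(a)
-- 	for i in range(0, len(hipotenusas)):
-- 		soma += hipotenusas[i]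
-- 	return(soma)
-- ===== SOURCE B (Python) =====
-- def soma_hipotenusas(n):
--     squares = set()
--     for i in range(1, n):
--         squares.add(i * i)
--     soma = 0
--     for a in range(5, n + 1):
--         for b in range(1, a):
--             if a * a - b * b in squares:
--                 soma += a
--                 break
--     return soma
-- ===== Notes on version B (the rewrite author's own statement) =====
-- stated objective: faster
-- what changed: Replaced A's triple nested loop (for each a, all pairs b,c) and final index-sum pass by a precomputed set of squares plus a double loop that tests a*a-b*b for set membership and breaks on the first hit, summing directly.
import Mathlib
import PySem

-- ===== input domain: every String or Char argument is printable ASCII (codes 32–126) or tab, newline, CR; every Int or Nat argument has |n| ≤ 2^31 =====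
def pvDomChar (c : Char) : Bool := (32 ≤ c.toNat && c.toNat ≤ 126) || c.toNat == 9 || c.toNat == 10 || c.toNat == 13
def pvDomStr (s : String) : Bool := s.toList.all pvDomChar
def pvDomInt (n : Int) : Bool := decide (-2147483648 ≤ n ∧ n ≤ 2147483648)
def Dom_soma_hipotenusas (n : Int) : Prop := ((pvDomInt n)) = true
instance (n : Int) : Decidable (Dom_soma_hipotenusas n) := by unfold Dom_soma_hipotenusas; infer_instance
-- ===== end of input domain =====

-- B replaces A's cubic triple loop by a precomputed set of squares and a double loop
-- with early break (faster, asymptotic: O(n^2) instead of O(n^3)).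

-- ===== PORT A =====
def soma_hipotenusas (n : Int) : Int :=
  let hip : List Int :=
    (PySem.List.pyRange 5 (n + 1) 1).foldl (fun hip a =>
      (PySem.List.pyRange (a - 1) 0 (-1)).foldl (fun hip b =>
        (PySem.List.pyRange (a - 1) 0 (-1)).foldl (fun hip c =>
          if c ^ 2 + b ^ 2 = a ^ 2 then
            (if !(hip.contains a) then hip ++ [a] else hip)
          else hip) hip) hip) []
  (PySem.List.pyRange 0 (hip.length : Int) 1).foldl
    (fun soma i => soma + PySem.List.pyGetD hip i 0) 0

-- ===== PORT B =====
-- the 'for b … break' loop of Source B: returns true on the first b whose a*a-b*b is a square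
def altFind (a : Int) (squares : PySem.Set Int) : List Int → Bool
  | [] => false
  | b :: rest =>
    if PySem.Set.contains squares (a * a - b * b) then true else altFind a squares rest

def soma_hipotenusas_alt (n : Int) : Int :=
  let squares : PySem.Set Int :=
    (PySem.List.pyRange 1 n 1).foldl (fun s i => PySem.Set.add s (i * i)) PySem.Set.empty
  (PySem.List.pyRange 5 (n + 1) 1).foldl (fun soma a =>
    if altFind a squares (PySem.List.pyRange 1 a 1) then soma + a else soma) 0

-- ===== PRECONDITION & SPEC =====
def Spec_soma_hipotenusas (n : Int) (out : Int) : Prop := out = soma_hipotenusas_alt n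
instance (n : Int) (out : Int) : Decidable (Spec_soma_hipotenusas n out) := by unfold Spec_soma_hipotenusas; infer_instance

-- ===== CLAIM (what is proved, stated in full; the proofs are below) =====
def Claim_equal_soma_hipotenusas : Prop := ∀ (n : Int), Dom_soma_hipotenusas n → Spec_soma_hipotenusas n (soma_hipotenusas n)

-- ===== LEMMAS AND PROOFS =====

-- A's per-a condition: a is a hypotenuse witnessed by legs scanned by the two inner loops
def PA (a : Int) : Prop := ∃ b, 1 ≤ b ∧ b < a ∧ ∃ c, 1 ≤ c ∧ c < a ∧ c ^ 2 + b ^ 2 = a ^ 2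

-- boolean form of PA, used as the filter predicate in outerA
def PAb (a : Int) : Bool :=
  decide (∃ b ∈ PySem.List.pyRange 1 a 1, ∃ c ∈ PySem.List.pyRange 1 a 1, c ^ 2 + b ^ 2 = a ^ 2)

theorem PAb_iff (a : Int) : PAb a = true ↔ PA a := by
  simp [PAb, PA, PySem.List.mem_pyRange_one, and_assoc]

-- innermost c-loop of A
theorem innerC (a b : Int) (l : List Int) (hip : List Int) :
    l.foldl (fun hip c =>
      if c ^ 2 + b ^ 2 = a ^ 2 then
        (if !(hip.contains a) then hip ++ [a] else hip)
      else hip) hip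
    = if (∃ c ∈ l, c ^ 2 + b ^ 2 = a ^ 2) ∧ a ∉ hip then hip ++ [a] else hip := by
  induction l generalizing hip with
  | nil => simp
  | cons x xs ih =>
    simp only [List.foldl_cons]
    by_cases hx : x ^ 2 + b ^ 2 = a ^ 2
    · by_cases hm : a ∈ hip
      · rw [if_pos hx, if_neg (by simp [hm]), ih]
        simp [hm]
      · rw [if_pos hx, if_pos (by simp [hm]), ih]
        simp [hx, hm]
    · rw [if_neg hx, ih]
      simp [hx]

-- middle b-loop of A
theorem innerB (a : Int) (lb lc : List Int) (hip : List Int) :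
    lb.foldl (fun hip b =>
      lc.foldl (fun hip c =>
        if c ^ 2 + b ^ 2 = a ^ 2 then
          (if !(hip.contains a) then hip ++ [a] else hip)
        else hip) hip) hip
    = if (∃ b ∈ lb, ∃ c ∈ lc, c ^ 2 + b ^ 2 = a ^ 2) ∧ a ∉ hip then hip ++ [a] else hip := by
  induction lb generalizing hip with
  | nil => simp
  | cons x xs ih =>
    simp only [List.foldl_cons]
    rw [innerC]
    by_cases hx : ∃ c ∈ lc, c ^ 2 + x ^ 2 = a ^ 2
    · by_cases hm : a ∈ hip
      · rw [if_neg (by tauto), ih]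
        simp [hm]
      · rw [if_pos ⟨hx, hm⟩, ih]
        simp [hx, hm]
    · rw [if_neg (fun h => hx h.1), ih]
      by_cases hrest : ∃ b ∈ xs, ∃ c ∈ lc, c ^ 2 + b ^ 2 = a ^ 2
      · simp [hx, hrest]
      · simp [hx, hrest]

-- range(a-1, 0, -1) membership written as bounds
theorem mem_countdown (a x : Int) :
    x ∈ PySem.List.pyRange (a - 1) 0 (-1) ↔ 1 ≤ x ∧ x < a := by
  rw [PySem.List.mem_pyRange_neg_one]; omega

-- outer a-loop of A builds the filtered range
theorem outerA (l : List Int) (hip : List Int)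
    (hfresh : ∀ x ∈ l, x ∉ hip) (hnd : l.Nodup) :
    l.foldl (fun hip a =>
      (PySem.List.pyRange (a - 1) 0 (-1)).foldl (fun hip b =>
        (PySem.List.pyRange (a - 1) 0 (-1)).foldl (fun hip c =>
          if c ^ 2 + b ^ 2 = a ^ 2 then
            (if !(hip.contains a) then hip ++ [a] else hip)
          else hip) hip) hip) hip
    = hip ++ l.filter PAb := by
  induction l generalizing hip with
  | nil => simp
  | cons x xs ih =>
    simp only [List.foldl_cons, List.filter_cons]
    rw [innerB]
    have hx : x ∉ hip := hfresh x (by simp)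
    have hpa : (∃ b ∈ PySem.List.pyRange (x - 1) 0 (-1),
        ∃ c ∈ PySem.List.pyRange (x - 1) 0 (-1), c ^ 2 + b ^ 2 = x ^ 2) ↔ PA x := by
      simp only [mem_countdown, PA]
      constructor
      · rintro ⟨b, ⟨hb1, hb2⟩, c, ⟨hc1, hc2⟩, h⟩; exact ⟨b, hb1, hb2, c, hc1, hc2, h⟩
      · rintro ⟨b, hb1, hb2, c, hc1, hc2, h⟩; exact ⟨b, ⟨hb1, hb2⟩, c, ⟨hc1, hc2⟩, h⟩
    have hnd' := (List.nodup_cons.mp hnd)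
    by_cases hP : PA x
    · rw [if_pos ⟨hpa.mpr hP, hx⟩, ih (hip ++ [x])
        (by intro y hy; simp only [List.mem_append, List.mem_singleton]
            push Not
            exact ⟨hfresh y (by simp [hy]), fun h => hnd'.1 (h ▸ hy)⟩) hnd'.2]
      simp [PAb_iff, hP]
    · rw [if_neg (by rw [hpa]; tauto), ih hip (fun y hy => hfresh y (by simp [hy])) hnd'.2]
      simp [PAb_iff, hP]

-- membership in B's precomputed set of squares
theorem mem_squares (n x : Int) :
    x ∈ (PySem.List.pyRange 1 n 1).foldl (fun s i => PySem.Set.add s (i * i)) PySem.Set.empty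
    ↔ ∃ i, 1 ≤ i ∧ i < n ∧ i * i = x := by
  have key : ∀ (l : List Int) (s : PySem.Set Int),
      (x ∈ l.foldl (fun s i => PySem.Set.add s (i * i)) s ↔ x ∈ s ∨ ∃ i ∈ l, i * i = x) := by
    intro l
    induction l with
    | nil => simp
    | cons y ys ih =>
      intro s
      simp only [List.foldl_cons, ih, PySem.Set.mem_add, List.mem_cons]
      constructor
      · rintro ((h | h) | ⟨i, hi, hh⟩)
        · exact Or.inl h
        · exact Or.inr ⟨y, Or.inl rfl, h.symm⟩
        · exact Or.inr ⟨i, Or.inr hi, hh⟩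
      · rintro (h | ⟨i, (rfl | hi), hh⟩)
        · exact Or.inl (Or.inl h)
        · exact Or.inl (Or.inr hh.symm)
        · exact Or.inr ⟨i, hi, hh⟩
  rw [key]
  simp [PySem.Set.empty, PySem.List.mem_pyRange_one]
  constructor
  · rintro ⟨i, ⟨h1, h2⟩, h⟩; exact ⟨i, h1, h2, h⟩
  · rintro ⟨i, h1, h2, h⟩; exact ⟨i, ⟨h1, h2⟩, h⟩

-- the break-search of B as an existential
theorem altFind_iff (a : Int) (s : PySem.Set Int) (l : List Int) :
    altFind a s l = true ↔ ∃ b ∈ l, (a * a - b * b) ∈ s := by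
  induction l with
  | nil => simp [altFind]
  | cons x xs ih =>
    by_cases hx : (a * a - x * x) ∈ s
    · simp [altFind, PySem.Set.contains, hx]
    · simp [altFind, PySem.Set.contains, hx, ih]

-- for 5 ≤ a ≤ n, the two per-a conditions agree
theorem cond_iff (n a : Int) (ha5 : 5 ≤ a) (han : a ≤ n) :
    PA a ↔
    altFind a ((PySem.List.pyRange 1 n 1).foldl (fun s i => PySem.Set.add s (i * i)) PySem.Set.empty)
      (PySem.List.pyRange 1 a 1) = true := by
  rw [altFind_iff]
  simp only [PySem.List.mem_pyRange_one, mem_squares, PA]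
  constructor
  · rintro ⟨b, hb1, hb2, c, hc1, hc2, h⟩
    refine ⟨b, ⟨hb1, hb2⟩, c, hc1, by omega, ?_⟩
    have : c * c + b * b = a * a := by ring_nf; ring_nf at h; linarith
    omega
  · rintro ⟨b, ⟨hb1, hb2⟩, i, hi1, hin, h⟩
    have hbb : 1 ≤ b * b := by nlinarith
    have hia : i < a := by nlinarith
    refine ⟨b, hb1, hb2, i, hi1, hia, by ring_nf; nlinarith⟩

-- folding an if-guarded sum equals summing the filtered list
theorem foldl_if_add (q : Int → Bool) (l : List Int) (s0 : Int) :
    l.foldl (fun s a => if q a then s + a else s) s0 = s0 + (l.filter q).sum := by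
  induction l generalizing s0 with
  | nil => simp
  | cons x xs ih =>
    by_cases hx : q x
    · simp [hx, ih]; ring
    · simp [hx, ih]

-- ===== VERDICT (by name: the statement is the Claim_ definition above) =====
theorem soma_hipotenusas_spec : Claim_equal_soma_hipotenusas := by
  intro n _
  show soma_hipotenusas n = soma_hipotenusas_alt n
  unfold soma_hipotenusas soma_hipotenusas_alt
  rw [outerA _ _ (by simp) (PySem.List.nodup_pyRange_one 5 (n + 1))]
  simp only [List.nil_append]
  rw [PySem.List.foldl_pyRange_zero_pyGetD']
  rw [foldl_if_add]
  simp only [Int.zero_add, ← List.sum_eq_foldl]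
  congr 1
  refine List.filter_congr ?_
  intro a ha
  rw [PySem.List.mem_pyRange_one] at ha
  have h := cond_iff n a ha.1 (by omega)
  rw [Bool.eq_iff_iff, PAb_iff]
  exact h
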